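-- pv_equiv track=rewrite | github.com/LeopardCheetah/acm-poker-bo-___-t | bot.py | is_high_pair
-- ===== SOURCE A (Python) =====
-- def is_high_pair(cards, board):
--     l = ['a', 'k', 'q', 'j', 't', '9', '8', '7', '6', '5', '4', '3', '2']
--
--     max_pair = 0
--     for b in board:
--         max_pair = max(max_pair, 14 - l.index(b[0]))
--
--     if 14 - l.index(cards[0][0]) == max_pair or 14 - l.index(cards[1][0]) == max_pair:
--         return 1
--
--     # check if theres an over pair.
--
--     for ind in range(14 - max_pair):
--         if l[ind] == cards[0][0] == cards[1][0]:
--             return 1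
--
--     return 0
-- ===== SOURCE B (Python) =====
-- def is_high_pair(cards, board):
--     # Flag-based single idea: never compute the board maximum. For a candidate rank
--     # index i, the card ties the board max iff some board card has the same index
--     # (eq) and none has a smaller index (beat); an over-pair iff neither eq nor beat.
--     l = ['a', 'k', 'q', 'j', 't', '9', '8', '7', '6', '5', '4', '3', '2']
--
--     def flags(i):
--         eq = beat = False
--         for b in board:
--             ib = l.index(b[0])
--             if ib == i:
--                 eq = True
--             if ib < i:
--                 beat = True
--         return eq, beat
--
--     i0 = l.index(cards[0][0])
--     eq0, beat0 = flags(i0)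
--     if eq0 and not beat0:
--         return 1
--     i1 = l.index(cards[1][0])
--     eq1, beat1 = flags(i1)
--     if eq1 and not beat1:
--         return 1
--     return 1 if i0 == i1 and not beat0 and not eq0 else 0
-- ===== Notes on version B (the rewrite author's own statement) =====
-- stated objective: alternative
-- what changed: B never computes the board maximum: for each hole card it makes a flag pass over the board collecting 'some board card ties this rank' and 'some board card beats this rank', returning 1 on tie-without-beat, and decides the over-pair case as neither-tie-nor-beat on a pair, eliminating both A's running-max loop and A's scan over the rank list.
-- crash fix: On an empty board with two valid, non-paired hole cards A raises IndexError (l[13] in the over-pair scan); B returns 0. — e.g. on is_high_pair(["as", "kd"], []): A raises IndexError, B returns 0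
import Mathlib
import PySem

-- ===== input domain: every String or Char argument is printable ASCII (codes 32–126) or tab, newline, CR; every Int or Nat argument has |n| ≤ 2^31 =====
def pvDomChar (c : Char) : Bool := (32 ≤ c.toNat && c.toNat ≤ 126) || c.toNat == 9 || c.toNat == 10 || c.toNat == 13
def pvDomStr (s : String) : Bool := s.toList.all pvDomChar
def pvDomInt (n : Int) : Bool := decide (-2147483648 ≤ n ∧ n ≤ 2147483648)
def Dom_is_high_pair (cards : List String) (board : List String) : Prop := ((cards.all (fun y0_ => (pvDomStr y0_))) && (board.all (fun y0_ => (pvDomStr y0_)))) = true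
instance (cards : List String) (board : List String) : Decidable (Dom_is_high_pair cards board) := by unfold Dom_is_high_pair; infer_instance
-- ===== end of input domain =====

-- B never computes the board maximum: per hole card it collects tie/beat flags over the
-- board and decides tie-with-max and over-pair from the flags (objective: alternative).

-- ===== PORT A =====
-- rank list l (one-character Python strings represented as Chars)
def pvL : List Char := ['a', 'k', 'q', 'j', 't', '9', '8', '7', '6', '5', '4', '3', '2']

-- l.index(s[0]); `.getD` defaults are only reached where the Python raises (outside Pre_)
def pvIdxA (s : String) : Int :=
  ((PySem.List.index? pvL ((PySem.Str.pyGet? s 0).getD ' ')).getD 14 : Int)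

-- the over-pair loop: for ind in range(14 - max_pair): if l[ind] == cards[0][0] == cards[1][0]: return 1
def pvLoopA (c0 c1 : Char) : List Int → Int
  | [] => 0
  | i :: rest =>
    if (PySem.List.pyGet? pvL i).getD ' ' = c0 ∧ c0 = c1 then 1 else pvLoopA c0 c1 rest

def is_high_pair (cards : List String) (board : List String) : Int :=
  let max_pair := board.foldl (fun mp b => max mp (14 - pvIdxA b)) 0
  if 14 - pvIdxA ((PySem.List.pyGet? cards 0).getD "") = max_pair ∨
     14 - pvIdxA ((PySem.List.pyGet? cards 1).getD "") = max_pair then 1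
  else
    pvLoopA ((PySem.Str.pyGet? ((PySem.List.pyGet? cards 0).getD "") 0).getD ' ')
            ((PySem.Str.pyGet? ((PySem.List.pyGet? cards 1).getD "") 0).getD ' ')
            (PySem.List.pyRange 0 (14 - max_pair) 1)

-- ===== PORT B =====
def pvLB : List Char := ['a', 'k', 'q', 'j', 't', '9', '8', '7', '6', '5', '4', '3', '2']

-- l.index(s[0]) (the default is only reached where Source B raises, outside Pre_)
def pvIdxB (s : String) : Int :=
  ((PySem.List.index? pvLB ((PySem.Str.pyGet? s 0).getD ' ')).getD 14 : Int)

-- the flags(i) helper: one pass over board collecting (eq, beat)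
def pvFlagsB (board : List String) (i : Int) : Bool × Bool :=
  board.foldl
    (fun st b =>
      let ib := pvIdxB b
      (st.1 || (ib == i), st.2 || decide (ib < i)))
    (false, false)

def is_high_pair_alt (cards : List String) (board : List String) : Int :=
  let i0 := pvIdxB ((PySem.List.pyGet? cards 0).getD "")
  let f0 := pvFlagsB board i0
  if f0.1 && !f0.2 then 1
  else
    let i1 := pvIdxB ((PySem.List.pyGet? cards 1).getD "")
    let f1 := pvFlagsB board i1
    if f1.1 && !f1.2 then 1
    else if i0 == i1 && !f0.2 && !f0.1 then 1 else 0

-- ===== PRECONDITION & SPEC =====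
-- helpers for Pre_ (independent of both ports)
def pvRanksP : List Char := ['a', 'k', 'q', 'j', 't', '9', '8', '7', '6', '5', '4', '3', '2']
def pvHeadP (s : String) : Char := (PySem.Str.pyGet? s 0).getD ' '
def pvOkP (s : String) : Prop := pvHeadP s ∈ pvRanksP
def pvValP (c : Char) : Int := 14 - ((PySem.List.index? pvRanksP c).getD 14 : Int)
def pvCardP (cards : List String) (i : Int) : String := (PySem.List.pyGet? cards i).getD ""
def pvMaxP (board : List String) : Int := (board.map (fun b => pvValP (pvHeadP b))).foldr max 0

-- Pre_ is exactly the set of inputs on which the Python A returns: it excludes only inputs where A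
-- raises (ValueError from l.index on a rank not in l, IndexError from a missing card or empty string
-- — respecting `or`'s short-circuit, which skips cards[1] when cards[0] already hits the board max —
-- and the IndexError at l[13] reached when the board is empty and the two hole cards are not a pair).
def Pre_is_high_pair (cards : List String) (board : List String) : Prop :=
  (∀ b ∈ board, pvOkP b) ∧ pvOkP (pvCardP cards 0) ∧
  (pvValP (pvHeadP (pvCardP cards 0)) = pvMaxP board ∨
    (pvOkP (pvCardP cards 1) ∧
      (pvValP (pvHeadP (pvCardP cards 1)) = pvMaxP board ∨
       pvHeadP (pvCardP cards 0) = pvHeadP (pvCardP cards 1) ∨ board ≠ [])))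
instance (cards : List String) (board : List String) : Decidable (Pre_is_high_pair cards board) := by
  unfold Pre_is_high_pair pvOkP; infer_instance

def pvWitness_is_high_pair : List String × List String := (["as", "kd"], ["qh"])

-- On an empty board with two valid, non-paired hole cards A raises IndexError (l[13] in the
-- over-pair scan); B returns 0 (no pair, no board card to match).
def Raises_is_high_pair (cards : List String) (board : List String) : Prop :=
  board = [] ∧ pvOkP (pvCardP cards 0) ∧ pvOkP (pvCardP cards 1) ∧
  pvHeadP (pvCardP cards 0) ≠ pvHeadP (pvCardP cards 1)
instance (cards : List String) (board : List String) : Decidable (Raises_is_high_pair cards board) := by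
  unfold Raises_is_high_pair pvOkP; infer_instance
def pvRaiseWitness_is_high_pair : List String × List String := (["as", "kd"], [])
def pvRaiseWitnessOut_is_high_pair : Int := 0

def Spec_is_high_pair (cards : List String) (board : List String) (out : Int) : Prop :=
  out = is_high_pair_alt cards board
instance (cards : List String) (board : List String) (out : Int) :
    Decidable (Spec_is_high_pair cards board out) := by unfold Spec_is_high_pair; infer_instance

-- ===== CLAIM (what is proved, stated in full; the proofs are below) =====
def Claim_equal_is_high_pair : Prop := ∀ (cards : List String) (board : List String),
  Dom_is_high_pair cards board → Pre_is_high_pair cards board →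
  Spec_is_high_pair cards board (is_high_pair cards board)

def Claim_raises_is_high_pair : Prop :=
  (∀ (cards : List String) (board : List String), Dom_is_high_pair cards board →
    Raises_is_high_pair cards board → ¬ Pre_is_high_pair cards board) ∧
  (Dom_is_high_pair (pvRaiseWitness_is_high_pair.1) (pvRaiseWitness_is_high_pair.2) ∧
   Raises_is_high_pair (pvRaiseWitness_is_high_pair.1) (pvRaiseWitness_is_high_pair.2) ∧
   is_high_pair_alt (pvRaiseWitness_is_high_pair.1) (pvRaiseWitness_is_high_pair.2) =
     pvRaiseWitnessOut_is_high_pair)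

-- ===== LEMMAS AND PROOFS =====

lemma pvValP_bounds (c : Char) (h : c ∈ pvRanksP) : 2 ≤ pvValP c ∧ pvValP c ≤ 14 := by
  fin_cases h <;> decide

lemma pvMaxP_nonneg (board : List String) : 0 ≤ pvMaxP board := by
  induction board with
  | nil => simp [pvMaxP]
  | cons x t ih =>
    simp only [pvMaxP, List.map_cons, List.foldr_cons]
    exact le_trans ih (le_max_right _ _)

lemma foldl_max_eq {α : Type} (f : α → Int) :
    ∀ (l : List α) (a : Int), 0 ≤ a →
      l.foldl (fun mp b => max mp (f b)) a = max a ((l.map f).foldr max 0) := by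
  intro l
  induction l with
  | nil => intro a ha; simp; omega
  | cons x t ih =>
    intro a ha
    simp only [List.foldl_cons, List.map_cons, List.foldr_cons]
    rw [ih _ (le_trans ha (le_max_left a (f x))), max_assoc]

lemma A_max (board : List String) :
    board.foldl (fun mp b => max mp (14 - pvIdxA b)) 0 = pvMaxP board := by
  rw [show (fun (mp : Int) b => max mp (14 - pvIdxA b)) =
        (fun (mp : Int) b => max mp (pvValP (pvHeadP b))) from rfl]
  rw [foldl_max_eq (fun b => pvValP (pvHeadP b)) board 0 le_rfl]
  have h := pvMaxP_nonneg board
  simp only [pvMaxP] at h ⊢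
  omega

lemma lookup_eq_iff (c0 : Char) (k0 : Nat) (h : PySem.List.index? pvL c0 = some k0)
    (i : Int) (hi : 0 ≤ i) :
    ((PySem.List.pyGet? pvL i).getD ' ' = c0) ↔ i = (k0 : Int) := by
  obtain ⟨hk, hek, hfirst⟩ := PySem.List.getElem_of_index?_eq_some h
  have hlen : pvL.length = 13 := by decide
  rw [PySem.List.pyGet?_of_nonneg pvL hi]
  by_cases hlt : i.toNat < pvL.length
  · rw [List.getElem?_eq_getElem hlt]
    simp only [Option.getD_some]
    constructor
    · intro he
      have := (List.Nodup.getElem_inj_iff (by decide : pvL.Nodup)).mp (he.trans hek.symm)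
      omega
    · intro he
      have hik : i.toNat = k0 := by omega
      rw [show pvL[i.toNat] = pvL[k0] from by congr 1]
      exact hek
  · rw [List.getElem?_eq_none (by omega)]
    simp only [Option.getD_none]
    constructor
    · intro he
      have hmem : c0 ∈ pvL := hek ▸ List.getElem_mem hk
      rw [← he] at hmem
      exact absurd hmem (by decide)
    · intro he; omega

lemma pvLoopA_range (c0 c1 : Char) (k0 : Nat) (h : PySem.List.index? pvL c0 = some k0)
    (n : Int) :
    ∀ (a : Int), 0 ≤ a →
      pvLoopA c0 c1 (PySem.List.pyRange a n 1) =
        if c0 = c1 ∧ a ≤ (k0 : Int) ∧ (k0 : Int) < n then 1 else 0 := by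
  suffices H : ∀ (m : Nat) (a : Int), 0 ≤ a → (n - a).toNat = m →
      pvLoopA c0 c1 (PySem.List.pyRange a n 1) =
        if c0 = c1 ∧ a ≤ (k0 : Int) ∧ (k0 : Int) < n then 1 else 0 by
    intro a ha; exact H _ a ha rfl
  intro m
  induction m with
  | zero =>
    intro a ha hm
    rw [PySem.List.pyRange_one_eq_nil (by omega)]
    simp only [pvLoopA]
    rw [if_neg]; rintro ⟨-, h1, h2⟩; omega
  | succ m ih =>
    intro a ha hm
    rw [PySem.List.pyRange_one_cons (by omega)]
    simp only [pvLoopA]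
    by_cases hmatch : (PySem.List.pyGet? pvL a).getD ' ' = c0 ∧ c0 = c1
    · rw [if_pos hmatch]
      have hak : a = (k0 : Int) := (lookup_eq_iff c0 k0 h a ha).mp hmatch.1
      rw [if_pos ⟨hmatch.2, by omega, by omega⟩]
    · rw [if_neg hmatch]
      rw [ih (a + 1) (by omega) (by omega)]
      by_cases hc : c0 = c1
      · have hne : a ≠ (k0 : Int) := fun hak =>
          hmatch ⟨(lookup_eq_iff c0 k0 h a ha).mpr hak, hc⟩
        simp only [hc, true_and]
        split_ifs <;> omega
      · simp [hc]

-- ===== B-side lemmas =====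

lemma pvIdxB_eq_idxA (s : String) : pvIdxB s = pvIdxA s := rfl

lemma idx_val (s : String) : pvIdxB s = 14 - pvValP (pvHeadP s) := by
  simp only [pvIdxB, pvValP, pvHeadP, show pvLB = pvRanksP from rfl]
  omega

lemma flags_spec (board : List String) (i : Int) :
    pvFlagsB board i =
      (board.any (fun b => pvIdxB b == i), board.any (fun b => decide (pvIdxB b < i))) := by
  unfold pvFlagsB
  suffices H : ∀ (l : List String) (a : Bool × Bool),
      l.foldl (fun st b =>
        let ib := pvIdxB b
        (st.1 || (ib == i), st.2 || decide (ib < i))) a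
      = (a.1 || l.any (fun b => pvIdxB b == i), a.2 || l.any (fun b => decide (pvIdxB b < i))) by
    rw [H board (false, false)]; simp
  intro l
  induction l with
  | nil => intro a; simp
  | cons x t ih => intro a; simp [List.any_cons, ih, Bool.or_assoc]

lemma le_foldr_max (l : List Int) (u : Int) (h : u ∈ l) : u ≤ l.foldr max 0 := by
  induction l with
  | nil => cases h
  | cons x t ih =>
    simp only [List.foldr_cons]
    rcases List.mem_cons.mp h with rfl | h
    · exact le_max_left _ _
    · exact le_trans (ih h) (le_max_right _ _)

lemma foldr_max_mem (l : List Int) (h : 0 < l.foldr max 0) : l.foldr max 0 ∈ l := by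
  induction l with
  | nil => simp at h
  | cons x t ih =>
    simp only [List.foldr_cons] at h ⊢
    by_cases hx : t.foldr max 0 ≤ x
    · rw [max_eq_left hx]; exact List.mem_cons_self ..
    · rw [max_eq_right (by omega)]
      rw [max_eq_right (by omega)] at h
      exact List.mem_cons_of_mem _ (ih h)

lemma foldr_max_le (l : List Int) (v : Int) (h0 : 0 ≤ v) (h : ∀ u ∈ l, u ≤ v) :
    l.foldr max 0 ≤ v := by
  induction l with
  | nil => simpa
  | cons x t ih =>
    simp only [List.foldr_cons]
    have := h x (by simp)
    have := ih (fun u hu => h u (by simp [hu]))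
    omega

lemma foldr_max_lt (l : List Int) (v : Int) (h0 : 0 < v) (h : ∀ u ∈ l, u < v) :
    l.foldr max 0 < v := by
  induction l with
  | nil => simpa
  | cons x t ih =>
    simp only [List.foldr_cons]
    have := h x (by simp)
    have := ih (fun u hu => h u (by simp [hu]))
    omega

-- tie-with-max ↔ the two flags, for a card of positive value
lemma flags_iff_max (board : List String) (v : Int) (hv : 0 < v) :
    ((board.any (fun b => pvIdxB b == 14 - v)) = true ∧
     (board.any (fun b => decide (pvIdxB b < 14 - v))) = false) ↔ v = pvMaxP board := by
  have hidx : ∀ b : String, pvIdxB b = 14 - pvValP (pvHeadP b) := idx_val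
  simp only [pvMaxP, List.any_eq_true, List.any_eq_false, beq_iff_eq, decide_eq_true_eq]
  constructor
  · rintro ⟨⟨b, hb, hbe⟩, hall⟩
    have hmem : v ∈ board.map (fun b => pvValP (pvHeadP b)) := by
      refine List.mem_map.mpr ⟨b, hb, ?_⟩
      have := hidx b; omega
    have h1 := le_foldr_max _ _ hmem
    have h2 : (board.map (fun b => pvValP (pvHeadP b))).foldr max 0 ≤ v := by
      refine foldr_max_le _ _ (by omega) ?_
      intro u hu
      obtain ⟨c, hc, rfl⟩ := List.mem_map.mp hu
      have := hall c hc
      have := hidx c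
      omega
    omega
  · intro hM
    have hmem : (board.map (fun b => pvValP (pvHeadP b))).foldr max 0
        ∈ board.map (fun b => pvValP (pvHeadP b)) :=
      foldr_max_mem _ (by omega)
    obtain ⟨b, hb, hbe⟩ := List.mem_map.mp hmem
    refine ⟨⟨b, hb, by have := hidx b; omega⟩, ?_⟩
    intro c hc
    have hle := le_foldr_max (board.map (fun b => pvValP (pvHeadP b)))
      (pvValP (pvHeadP c)) (List.mem_map.mpr ⟨c, hc, rfl⟩)
    have := hidx c
    omega

-- over-pair flag pair ↔ strictly above the board max, for a card of positive value
lemma flags_iff_over (board : List String) (v : Int) (hv : 0 < v) :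
    ((board.any (fun b => decide (pvIdxB b < 14 - v))) = false ∧
     (board.any (fun b => pvIdxB b == 14 - v)) = false) ↔ pvMaxP board < v := by
  have hidx : ∀ b : String, pvIdxB b = 14 - pvValP (pvHeadP b) := idx_val
  simp only [pvMaxP, List.any_eq_false, beq_iff_eq, decide_eq_true_eq]
  constructor
  · rintro ⟨hbeat, heq⟩
    refine foldr_max_lt _ _ hv ?_
    intro u hu
    obtain ⟨c, hc, rfl⟩ := List.mem_map.mp hu
    have := hbeat c hc
    have := heq c hc
    have := hidx c
    omega
  · intro hM
    constructor <;> intro c hc <;>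
    · have hle := le_foldr_max (board.map (fun b => pvValP (pvHeadP b)))
        (pvValP (pvHeadP c)) (List.mem_map.mpr ⟨c, hc, rfl⟩)
      have := hidx c
      omega

lemma idx_inj (c0 c1 : Char) (h0 : c0 ∈ pvRanksP) (h1 : c1 ∈ pvRanksP) :
    (PySem.List.index? pvL c0).getD 14 = (PySem.List.index? pvL c1).getD 14 → c0 = c1 := by
  fin_cases h0 <;> fin_cases h1 <;> decide

lemma main_eq (cards board : List String) (hpre : Pre_is_high_pair cards board) :
    is_high_pair cards board = is_high_pair_alt cards board := by
  obtain ⟨hokb, hok0, hdisj⟩ := hpre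
  simp only [is_high_pair, is_high_pair_alt]
  rw [A_max board]
  simp only [flags_spec,
    show (PySem.List.pyGet? cards 0).getD "" = pvCardP cards 0 from rfl,
    show (PySem.List.pyGet? cards 1).getD "" = pvCardP cards 1 from rfl]
  simp only [show (PySem.Str.pyGet? (pvCardP cards 0) 0).getD ' ' = pvHeadP (pvCardP cards 0) from rfl,
    show (PySem.Str.pyGet? (pvCardP cards 1) 0).getD ' ' = pvHeadP (pvCardP cards 1) from rfl]
  set c0 := pvHeadP (pvCardP cards 0) with hc0
  set c1 := pvHeadP (pvCardP cards 1) with hc1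
  have hv0 := pvValP_bounds c0 hok0
  have hi0 : pvIdxB (pvCardP cards 0) = 14 - pvValP c0 := idx_val _
  have hi1 : pvIdxB (pvCardP cards 1) = 14 - pvValP c1 := idx_val _
  have hA0 : (14 : Int) - pvIdxA (pvCardP cards 0) = pvValP c0 := by
    rw [← pvIdxB_eq_idxA]; omega
  have hA1 : (14 : Int) - pvIdxA (pvCardP cards 1) = pvValP c1 := by
    rw [← pvIdxB_eq_idxA]; omega
  rw [hA0, hA1]
  by_cases hP0 : pvValP c0 = pvMaxP board
  · -- first card ties the board max: both sides 1
    rw [if_pos (Or.inl hP0)]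
    have hQ0 := (flags_iff_max board (pvValP c0) (by omega)).mpr hP0
    rw [if_pos (show _ = true by rw [hi0]; simp [hQ0.1, hQ0.2])]
  · -- first card does not tie the max: Pre_ gives validity of the second card
    obtain ⟨hok1, hrest⟩ : pvOkP (pvCardP cards 1) ∧ _ := by
      rcases hdisj with hv | hrest
      · exact absurd hv hP0
      · exact hrest
    have hv1 := pvValP_bounds c1 hok1
    have hQ0 : ¬ (((board.any fun b => pvIdxB b == pvIdxB (pvCardP cards 0)) &&
        !(board.any fun b => decide (pvIdxB b < pvIdxB (pvCardP cards 0)))) = true) := by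
      intro h
      simp only [Bool.and_eq_true, Bool.not_eq_true'] at h
      rw [hi0] at h
      exact hP0 ((flags_iff_max board (pvValP c0) (by omega)).mp h)
    by_cases hP1 : pvValP c1 = pvMaxP board
    · rw [if_pos (Or.inr hP1), if_neg hQ0]
      have hQ1 := (flags_iff_max board (pvValP c1) (by omega)).mpr hP1
      rw [if_pos (show _ = true by rw [hi1]; simp [hQ1.1, hQ1.2])]
    · have hQ1 : ¬ (((board.any fun b => pvIdxB b == pvIdxB (pvCardP cards 1)) &&
          !(board.any fun b => decide (pvIdxB b < pvIdxB (pvCardP cards 1)))) = true) := by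
        intro h
        simp only [Bool.and_eq_true, Bool.not_eq_true'] at h
        rw [hi1] at h
        exact hP1 ((flags_iff_max board (pvValP c1) (by omega)).mp h)
      rw [if_neg (by rintro (h | h) <;> [exact hP0 h; exact hP1 h]), if_neg hQ0, if_neg hQ1]
      -- over-pair branches
      obtain ⟨k0, hik0⟩ : ∃ k0, PySem.List.index? pvL c0 = some k0 :=
        Option.isSome_iff_exists.mp (by rw [PySem.List.index?_isSome_iff]; exact hok0)
      rw [pvLoopA_range c0 c1 k0 hik0 _ 0 le_rfl]
      have hk0 : pvIdxB (pvCardP cards 0) = (k0 : Int) := by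
        simp only [pvIdxB, show pvLB = pvL from rfl]
        rw [show (PySem.Str.pyGet? (pvCardP cards 0) 0).getD ' ' = c0 from rfl, hik0]
        simp
      have heqc : c0 = c1 ↔ pvIdxB (pvCardP cards 0) = pvIdxB (pvCardP cards 1) := by
        constructor
        · intro h
          simp only [pvIdxB]
          rw [show (PySem.Str.pyGet? (pvCardP cards 0) 0).getD ' ' = c0 from rfl,
              show (PySem.Str.pyGet? (pvCardP cards 1) 0).getD ' ' = c1 from rfl, h]
        · intro h
          exact idx_inj c0 c1 hok0 hok1 (by simpa [pvIdxB, show pvLB = pvL from rfl] using h)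
      have hover : pvMaxP board < pvValP c0 ↔
          ((board.any (fun b => decide (pvIdxB b < pvIdxB (pvCardP cards 0)))) = false ∧
           (board.any (fun b => pvIdxB b == pvIdxB (pvCardP cards 0))) = false) := by
        rw [hi0]
        exact (flags_iff_over board (pvValP c0) (by omega)).symm
      by_cases hR : c0 = c1 ∧ 0 ≤ (k0 : Int) ∧ (k0 : Int) < 14 - pvMaxP board
      · rw [if_pos hR]
        have hov := hover.mp (by omega)
        rw [if_pos (show _ = true by
          simp only [Bool.and_eq_true, beq_iff_eq, Bool.not_eq_true']
          exact ⟨⟨heqc.mp hR.1, hov.1⟩, hov.2⟩)]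
      · rw [if_neg hR]
        have hnb : ¬ (((pvIdxB (pvCardP cards 0) == pvIdxB (pvCardP cards 1)) &&
            !(board.any fun b => decide (pvIdxB b < pvIdxB (pvCardP cards 0))) &&
            !(board.any fun b => pvIdxB b == pvIdxB (pvCardP cards 0))) = true) := by
          intro hb
          simp only [Bool.and_eq_true, beq_iff_eq, Bool.not_eq_true'] at hb
          obtain ⟨⟨hbi, hbeat⟩, hbeq⟩ := hb
          have hcc : c0 = c1 := heqc.mpr hbi
          have hov : pvMaxP board < pvValP c0 := hover.mpr ⟨hbeat, hbeq⟩
          exact hR ⟨hcc, by omega, by omega⟩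
        rw [if_neg hnb]

-- ===== VERDICT (by name: the statement is the Claim_ definition above) =====
theorem is_high_pair_spec : Claim_equal_is_high_pair := by
  intro cards board _ hpre
  unfold Spec_is_high_pair
  exact main_eq cards board hpre

@[simp] theorem is_high_pair_raises : Claim_raises_is_high_pair := by
  unfold Claim_raises_is_high_pair
  constructor
  · intro cards board _ hr hpre
    obtain ⟨hb, hok0, hok1, hne⟩ := hr
    obtain ⟨-, -, hdisj⟩ := hpre
    subst hb
    have h0 := (pvValP_bounds _ hok0).1
    have h1 := (pvValP_bounds _ hok1).1
    simp only [pvMaxP, List.map_nil, List.foldr_nil] at hdisj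
    rcases hdisj with hv0 | ⟨-, hv1 | hc | hnil⟩
    · omega
    · omega
    · exact hne hc
    · exact hnil rfl
  · exact ⟨by decide, by decide, by decide⟩
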